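-- pv_equiv track=rewrite | github.com/shinysocks/mov-cli-subtitles | mov_cli/scrapers/sflix.py | __key_extraction
-- ===== SOURCE A (Python) =====
-- def __key_extraction(string, table):
--     decrypted_key = []
--     offset = 0
--     encrypted_string = string
--
--     for start, end in table:
--         decrypted_key.append(encrypted_string[start - offset:end - offset])
--         encrypted_string = (
--             encrypted_string[:start - offset] + encrypted_string[end - offset:]
--         )
--         offset += end - start
--
--     return "".join(decrypted_key), encrypted_string
-- ===== SOURCE B (Python) =====
-- # Rope-based re-implementation: the string is never copied while processing the
-- # table; instead a list of (lo, hi) segments into the original string is split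
-- # per table entry, and the two outputs are materialised once at the end.
--
-- def _clamp(i, n):
--     if i < 0:
--         return max(0, n + i)
--     return min(i, n)
--
--
-- def _rope_take(segs, k):
--     out = []
--     for lo, hi in segs:
--         if k <= hi - lo:
--             out.append((lo, lo + k))
--             return out
--         out.append((lo, hi))
--         k -= hi - lo
--     return out
--
--
-- def _rope_drop(segs, k):
--     for idx, (lo, hi) in enumerate(segs):
--         if k <= hi - lo:
--             return [(lo + k, hi)] + segs[idx + 1:]
--         k -= hi - lo
--     return []
--
--
-- def __key_extraction(string, table):
--     n = len(string)
--     segs = [(0, n)]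
--     total = n
--     offset = 0
--     key_segs = []
--     for start, end in table:
--         a = _clamp(start - offset, total)
--         b = _clamp(end - offset, total)
--         if a < b:
--             key_segs.extend(_rope_take(_rope_drop(segs, a), b - a))
--         segs = _rope_take(segs, a) + _rope_drop(segs, b)
--         total = a + (total - b)
--         offset += end - start
--     key = "".join(string[lo:hi] for lo, hi in key_segs)
--     rem = "".join(string[lo:hi] for lo, hi in segs)
--     return key, rem
-- ===== Notes on version B (the rewrite author's own statement) =====
-- stated objective: alternative
-- what changed: Replaces per-entry string slicing and re-concatenation with a rope of (lo,hi) index segments into the original string, splitting segments per table entry and materialising both output strings only once at the end; it trades string copying for index bookkeeping (O(n+k^2) index ops vs O(k*n) char copies), which CPython's fast slice memcpy makes a wash in practice.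
import Mathlib
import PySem

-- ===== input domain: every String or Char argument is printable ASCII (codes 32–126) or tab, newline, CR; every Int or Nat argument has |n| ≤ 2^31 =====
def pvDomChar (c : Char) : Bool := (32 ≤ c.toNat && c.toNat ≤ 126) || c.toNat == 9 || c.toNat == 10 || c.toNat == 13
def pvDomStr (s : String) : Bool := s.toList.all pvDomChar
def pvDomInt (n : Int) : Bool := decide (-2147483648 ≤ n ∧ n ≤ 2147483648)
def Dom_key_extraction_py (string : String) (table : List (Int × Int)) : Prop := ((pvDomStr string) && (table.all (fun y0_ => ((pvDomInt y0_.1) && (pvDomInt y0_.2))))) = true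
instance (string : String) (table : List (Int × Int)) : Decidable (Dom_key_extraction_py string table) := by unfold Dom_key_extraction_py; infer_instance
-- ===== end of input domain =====

-- B replaces A's per-entry string slicing/concatenation with a rope of index
-- segments into the original string (alternative algorithm, similar cost).

-- ===== PORT A =====
-- A's loop: for (start, end) append enc[start-offset:end-offset] to the key list,
-- remove that slice from enc, bump offset; finally "".join the key list.
def key_extraction_py (string : String) (table : List (Int × Int)) : String × String :=
  let st := table.foldl
    (fun (acc : List (List Char) × Int × List Char) se =>
      let key := acc.1; let offset := acc.2.1; let enc := acc.2.2
      (key ++ [PySem.List.slice enc (some (se.1 - offset)) (some (se.2 - offset))],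
       offset + (se.2 - se.1),
       PySem.List.slice enc none (some (se.1 - offset)) ++
         PySem.List.slice enc (some (se.2 - offset)) none))
    ([], 0, string.toList)
  (String.ofList (PySem.Chars.join [] st.1), String.ofList st.2.2)

-- ===== PORT B =====
-- B-side helpers: Python slice-index clamp, and take/drop on a rope of segments.
def pvClamp (i : Int) (n : Nat) : Nat :=
  if i < 0 then (max 0 ((n : Int) + i)).toNat else min i.toNat n

def pvRopeTake : List (Nat × Nat) → Nat → List (Nat × Nat)
  | [], _ => []
  | (lo, hi) :: rest, k =>
    if k ≤ hi - lo then [(lo, lo + k)] else (lo, hi) :: pvRopeTake rest (k - (hi - lo))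

def pvRopeDrop : List (Nat × Nat) → Nat → List (Nat × Nat)
  | [], _ => []
  | (lo, hi) :: rest, k =>
    if k ≤ hi - lo then (lo + k, hi) :: rest else pvRopeDrop rest (k - (hi - lo))

-- "".join(string[lo:hi] for (lo,hi) in segs) with 0 ≤ lo ≤ hi ≤ len.
def pvFlatten (orig : List Char) (segs : List (Nat × Nat)) : List Char :=
  segs.flatMap (fun p => (orig.drop p.1).take (p.2 - p.1))

def key_extraction_py_alt (string : String) (table : List (Int × Int)) : String × String :=
  let n := string.toList.length
  let st := table.foldl
    (fun (acc : List (Nat × Nat) × Nat × Int × List (Nat × Nat)) se =>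
      let segs := acc.1; let total := acc.2.1
      let offset := acc.2.2.1; let keySegs := acc.2.2.2
      let a := pvClamp (se.1 - offset) total
      let b := pvClamp (se.2 - offset) total
      (pvRopeTake segs a ++ pvRopeDrop segs b,
       a + (total - b),
       offset + (se.2 - se.1),
       if a < b then keySegs ++ pvRopeTake (pvRopeDrop segs a) (b - a) else keySegs))
    ([(0, n)], n, 0, [])
  (String.ofList (pvFlatten string.toList st.2.2.2), String.ofList (pvFlatten string.toList st.1))

-- ===== PRECONDITION & SPEC =====
def Spec_key_extraction_py (string : String) (table : List (Int × Int)) (out : String × String) : Prop := out = key_extraction_py_alt string table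
instance (string : String) (table : List (Int × Int)) (out : String × String) : Decidable (Spec_key_extraction_py string table out) := by unfold Spec_key_extraction_py; infer_instance

-- ===== CLAIM (what is proved, stated in full; the proofs are below) =====
def Claim_equal_key_extraction_py : Prop := ∀ (string : String) (table : List (Int × Int)), Dom_key_extraction_py string table → Spec_key_extraction_py string table (key_extraction_py string table)

-- ===== LEMMAS AND PROOFS =====

theorem pvClamp_eq (i : Int) (n : Nat) : pvClamp i n = PySem.List.clampIdx n i := by
  simp [pvClamp, PySem.List.clampIdx]
  split_ifs <;> omega

def pvWF (n : Nat) (segs : List (Nat × Nat)) : Prop :=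
  ∀ p ∈ segs, p.1 ≤ p.2 ∧ p.2 ≤ n

theorem pvFlatten_append (orig : List Char) (xs ys : List (Nat × Nat)) :
    pvFlatten orig (xs ++ ys) = pvFlatten orig xs ++ pvFlatten orig ys := by
  simp [pvFlatten]

theorem pvSegLen (orig : List Char) (lo hi : Nat) (h1 : lo ≤ hi) (h2 : hi ≤ orig.length) :
    ((orig.drop lo).take (hi - lo)).length = hi - lo := by
  simp [List.length_take, List.length_drop]; omega

theorem pvFlatten_ropeTake (orig : List Char) (segs : List (Nat × Nat)) (k : Nat)
    (hwf : pvWF orig.length segs) :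
    pvFlatten orig (pvRopeTake segs k) = (pvFlatten orig segs).take k := by
  induction segs generalizing k with
  | nil => simp [pvFlatten, pvRopeTake]
  | cons p rest ih =>
    obtain ⟨lo, hi⟩ := p
    obtain ⟨h1, h2⟩ := hwf (lo, hi) (List.mem_cons_self ..)
    have hrest : pvWF orig.length rest := fun q hq => hwf q (List.mem_cons_of_mem _ hq)
    have hlen := pvSegLen orig lo hi h1 h2
    by_cases hk : k ≤ hi - lo
    · simp only [pvRopeTake, if_pos hk, pvFlatten, List.flatMap_cons, List.flatMap_nil,
        List.append_nil, List.take_append, hlen]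
      have : k - (hi - lo) = 0 := by omega
      rw [this]
      simp [List.take_take, hk]
    · have ih' := ih (k - (hi - lo)) hrest
      simp only [pvFlatten] at ih'
      simp only [pvRopeTake, if_neg hk, pvFlatten, List.flatMap_cons, List.take_append, hlen]
      rw [List.take_take, ih']
      congr 2
      omega

theorem pvFlatten_ropeDrop (orig : List Char) (segs : List (Nat × Nat)) (k : Nat)
    (hwf : pvWF orig.length segs) :
    pvFlatten orig (pvRopeDrop segs k) = (pvFlatten orig segs).drop k := by
  induction segs generalizing k with
  | nil => simp [pvFlatten, pvRopeDrop]
  | cons p rest ih =>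
    obtain ⟨lo, hi⟩ := p
    obtain ⟨h1, h2⟩ := hwf (lo, hi) (List.mem_cons_self ..)
    have hrest : pvWF orig.length rest := fun q hq => hwf q (List.mem_cons_of_mem _ hq)
    have hlen := pvSegLen orig lo hi h1 h2
    by_cases hk : k ≤ hi - lo
    · simp only [pvRopeDrop, if_pos hk, pvFlatten, List.flatMap_cons, List.drop_append, hlen]
      have : k - (hi - lo) = 0 := by omega
      rw [this]
      congr 1
      rw [List.drop_take, ← List.drop_drop]
      congr 1
      omega
    · simp only [pvRopeDrop, if_neg hk, pvFlatten, List.flatMap_cons, List.drop_append, hlen]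
      rw [List.drop_of_length_le (by omega), List.nil_append]
      exact (ih _ hrest).trans rfl

theorem pvWF_ropeTake (n : Nat) (segs : List (Nat × Nat)) (k : Nat) (hwf : pvWF n segs) :
    pvWF n (pvRopeTake segs k) := by
  induction segs generalizing k with
  | nil => simpa [pvRopeTake] using hwf
  | cons p rest ih =>
    obtain ⟨lo, hi⟩ := p
    obtain ⟨h1, h2⟩ := hwf (lo, hi) (List.mem_cons_self ..)
    have hrest : pvWF n rest := fun q hq => hwf q (List.mem_cons_of_mem _ hq)
    intro q hq
    by_cases hk : k ≤ hi - lo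
    · simp only [pvRopeTake, if_pos hk, List.mem_singleton] at hq
      subst hq; constructor <;> omega
    · simp only [pvRopeTake, if_neg hk, List.mem_cons] at hq
      rcases hq with h | h
      · subst h; exact ⟨h1, h2⟩
      · exact ih _ hrest q h

theorem pvWF_ropeDrop (n : Nat) (segs : List (Nat × Nat)) (k : Nat) (hwf : pvWF n segs) :
    pvWF n (pvRopeDrop segs k) := by
  induction segs generalizing k with
  | nil => simpa [pvRopeDrop] using hwf
  | cons p rest ih =>
    obtain ⟨lo, hi⟩ := p
    obtain ⟨h1, h2⟩ := hwf (lo, hi) (List.mem_cons_self ..)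
    have hrest : pvWF n rest := fun q hq => hwf q (List.mem_cons_of_mem _ hq)
    intro q hq
    by_cases hk : k ≤ hi - lo
    · simp only [pvRopeDrop, if_pos hk, List.mem_cons] at hq
      rcases hq with h | h
      · subst h; constructor <;> omega
      · exact hrest q h
    · simp only [pvRopeDrop, if_neg hk] at hq
      exact ih _ hrest q hq

theorem pvJoin_nil (parts : List (List Char)) :
    PySem.Chars.join [] parts = parts.flatten := by
  simp [PySem.Chars.join, List.intercalate]
  induction parts with
  | nil => simp
  | cons x xs ih =>
    cases xs with
    | nil => simp [List.intersperse]
    | cons y ys => simpa [List.intersperse] using ih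

-- length of the flattening under WF
theorem pvSlice_eq_take_drop (enc : List Char) (s e : Int) :
    PySem.List.slice enc (some s) (some e)
      = (enc.drop (PySem.List.clampIdx enc.length s)).take
          (PySem.List.clampIdx enc.length e - PySem.List.clampIdx enc.length s) := by
  rfl

theorem pvSlice_to (enc : List Char) (s : Int) :
    PySem.List.slice enc none (some s) = enc.take (PySem.List.clampIdx enc.length s) := by
  simp [PySem.List.slice]

theorem pvSlice_from (enc : List Char) (s : Int) :
    PySem.List.slice enc (some s) none = enc.drop (PySem.List.clampIdx enc.length s) := by
  simp [PySem.List.slice]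

-- the main fold invariant
theorem pvFold_inv (orig : List Char) (table : List (Int × Int))
    (key : List (List Char)) (offset : Int) (enc : List Char)
    (segs : List (Nat × Nat)) (total : Nat) (keySegs : List (Nat × Nat))
    (hflat : pvFlatten orig segs = enc)
    (htot : total = enc.length)
    (hkey : pvFlatten orig keySegs = key.flatten)
    (hwf : pvWF orig.length segs) :
    let stA := table.foldl
      (fun (acc : List (List Char) × Int × List Char) se =>
        (acc.1 ++ [PySem.List.slice acc.2.2 (some (se.1 - acc.2.1)) (some (se.2 - acc.2.1))],
         acc.2.1 + (se.2 - se.1),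
         PySem.List.slice acc.2.2 none (some (se.1 - acc.2.1)) ++
           PySem.List.slice acc.2.2 (some (se.2 - acc.2.1)) none))
      (key, offset, enc)
    let stB := table.foldl
      (fun (acc : List (Nat × Nat) × Nat × Int × List (Nat × Nat)) se =>
        let a := pvClamp (se.1 - acc.2.2.1) acc.2.1
        let b := pvClamp (se.2 - acc.2.2.1) acc.2.1
        (pvRopeTake acc.1 a ++ pvRopeDrop acc.1 b,
         a + (acc.2.1 - b),
         acc.2.2.1 + (se.2 - se.1),
         if a < b then acc.2.2.2 ++ pvRopeTake (pvRopeDrop acc.1 a) (b - a) else acc.2.2.2))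
      (segs, total, offset, keySegs)
    pvFlatten orig stB.1 = stA.2.2 ∧ pvFlatten orig stB.2.2.2 = stA.1.flatten := by
  induction table generalizing key offset enc segs total keySegs with
  | nil => exact ⟨hflat, hkey⟩
  | cons se rest ih =>
    simp only [List.foldl_cons]
    set a := pvClamp (se.1 - offset) total with ha
    set b := pvClamp (se.2 - offset) total with hb
    have ha' : a = PySem.List.clampIdx enc.length (se.1 - offset) := by
      rw [ha, pvClamp_eq, htot]
    have hb' : b = PySem.List.clampIdx enc.length (se.2 - offset) := by
      rw [hb, pvClamp_eq, htot]
    have hale : a ≤ enc.length := by rw [ha']; exact PySem.List.clampIdx_le ..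
    have hble : b ≤ enc.length := by rw [hb']; exact PySem.List.clampIdx_le ..
    -- new encrypted string
    have henc' : pvFlatten orig (pvRopeTake segs a ++ pvRopeDrop segs b)
        = PySem.List.slice enc none (some (se.1 - offset)) ++
            PySem.List.slice enc (some (se.2 - offset)) none := by
      rw [pvFlatten_append, pvFlatten_ropeTake _ _ _ hwf, pvFlatten_ropeDrop _ _ _ hwf,
        hflat, pvSlice_to, pvSlice_from, ← ha', ← hb']
    -- new key
    have hkey' : pvFlatten orig (if a < b then keySegs ++ pvRopeTake (pvRopeDrop segs a) (b - a) else keySegs)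
        = (key ++ [PySem.List.slice enc (some (se.1 - offset)) (some (se.2 - offset))]).flatten := by
      have hpart : pvFlatten orig (pvRopeTake (pvRopeDrop segs a) (b - a))
          = PySem.List.slice enc (some (se.1 - offset)) (some (se.2 - offset)) := by
        rw [pvFlatten_ropeTake _ _ _ (pvWF_ropeDrop _ _ _ hwf),
          pvFlatten_ropeDrop _ _ _ hwf, hflat, pvSlice_eq_take_drop, ← ha', ← hb']
      by_cases hab : a < b
      · rw [if_pos hab, pvFlatten_append, hkey, hpart]
        simp
      · rw [if_neg hab, hkey]
        have hsl : PySem.List.slice enc (some (se.1 - offset)) (some (se.2 - offset)) = [] := by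
          rw [pvSlice_eq_take_drop, ← ha', ← hb']
          have : b - a = 0 := by omega
          simp [this]
        simp [hsl]
    have htot' : a + (total - b) =
        (PySem.List.slice enc none (some (se.1 - offset)) ++
          PySem.List.slice enc (some (se.2 - offset)) none).length := by
      rw [pvSlice_to, pvSlice_from, ← ha', ← hb']
      simp [List.length_take, List.length_drop]
      omega
    exact ih _ _ _ _ _ _ henc' htot' hkey'
      (fun q hq => by
        rcases List.mem_append.1 hq with h | h
        · exact pvWF_ropeTake _ _ _ hwf q h
        · exact pvWF_ropeDrop _ _ _ hwf q h)

-- ===== VERDICT (by name: the statement is the Claim_ definition above) =====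
theorem key_extraction_py_spec : Claim_equal_key_extraction_py := by
  intro string table _
  unfold Spec_key_extraction_py key_extraction_py key_extraction_py_alt
  have h := pvFold_inv string.toList table [] 0 string.toList
      [(0, string.toList.length)] string.toList.length []
      (by simp [pvFlatten]) rfl (by simp [pvFlatten])
      (by intro q hq; simp at hq; subst hq; simp)
  simp only at h ⊢
  rw [h.1, h.2, pvJoin_nil]
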